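-- pv_equiv track=rewrite | github.com/dudamarlena/pyc_source | pycfiles/raingutter-0.9.linux-x86_64.tar/raingutter.py | key_value_copy
-- ===== SOURCE A (Python) =====
-- def key_value_copy(source_data, dest_key_cv, dest_value_cv):
--     """
--     Transfer the values from a source DB row to the dest DB k/v seqs.
--     The source_data tuple and (dest_key_cv + dest_value_cv) must be the
--     same length.
--     Returns a tuple of (key_cv, value_cv).
--     Parameters:
--         source_data: a row tuple from the source database results, as
--                      modified by the transform function
--         dest_key_cv: the key cv sequence from the template for the
--                      destination database
--         dest_value_cv: the value cv sequence from the template for the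
--                        destination database
--     """
--     new_dest_key_cv = []
--     new_dest_value_cv = []
--     num_keys = len(dest_key_cv)
--     for i, data_val in enumerate(source_data):
--         if i < num_keys:
--             new_dest_key_cv.append((
--              dest_key_cv[i][0], dest_key_cv[i][1], data_val))
--         else:
--             new_dest_value_cv.append((
--              dest_value_cv[(i - num_keys)][0],
--              dest_value_cv[(i - num_keys)][1], data_val))
--
--     return (
--      new_dest_key_cv, new_dest_value_cv)
-- ===== SOURCE B (Python) =====
-- def key_value_copy(source_data, dest_key_cv, dest_value_cv):
--     """Recursive version: no indices or counters; recursion consumes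
--     source_data together with dest_key_cv, then dest_value_cv, consing
--     each triple onto the recursive result."""
--     if not source_data:
--         return ([], [])
--     d = source_data[0]
--     if dest_key_cv:
--         cv = dest_key_cv[0]
--         keys, vals = key_value_copy(source_data[1:], dest_key_cv[1:], dest_value_cv)
--         return ([(cv[0], cv[1], d)] + keys, vals)
--     cv = dest_value_cv[0]
--     keys, vals = key_value_copy(source_data[1:], dest_key_cv, dest_value_cv[1:])
--     return (keys, [(cv[0], cv[1], d)] + vals)
-- ===== Notes on version B (the rewrite author's own statement) =====
-- stated objective: alternative
-- what changed: Replaces A's indexed accumulator loop (enumerate, i < num_keys test, i - num_keys offset lookups) by a structural recursion that consumes source_data together with dest_key_cv and then dest_value_cv head-by-head, consing triples onto the recursive result; no indices or counters appear.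
import Mathlib
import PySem

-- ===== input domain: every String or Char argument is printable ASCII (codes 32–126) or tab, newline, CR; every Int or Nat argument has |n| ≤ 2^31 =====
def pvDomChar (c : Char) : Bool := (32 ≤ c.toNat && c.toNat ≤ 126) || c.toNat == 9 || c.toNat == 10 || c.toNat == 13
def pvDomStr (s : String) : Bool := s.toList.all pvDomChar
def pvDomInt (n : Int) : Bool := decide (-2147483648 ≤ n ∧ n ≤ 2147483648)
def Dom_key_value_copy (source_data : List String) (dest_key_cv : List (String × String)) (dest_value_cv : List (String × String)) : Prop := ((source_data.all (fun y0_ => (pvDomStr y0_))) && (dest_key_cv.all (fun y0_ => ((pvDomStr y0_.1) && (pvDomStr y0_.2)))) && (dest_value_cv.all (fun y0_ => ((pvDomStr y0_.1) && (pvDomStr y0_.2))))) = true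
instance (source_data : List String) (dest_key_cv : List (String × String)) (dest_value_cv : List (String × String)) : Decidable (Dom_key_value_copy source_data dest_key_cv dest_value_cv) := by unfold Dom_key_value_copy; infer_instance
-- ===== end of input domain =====

-- B replaces A's indexed branching loop by a head-by-head structural recursion over the three lists (objective: alternative decomposition).


-- ===== PORT A =====
-- A's 'for i, data_val in enumerate(source_data)' with the in-loop branch, as structural
-- recursion over the enumerated list threading the two accumulators.  dest_key_cv[i] /
-- dest_value_cv[i-num_keys] is PySem.List.pyGet?; the none case (IndexError) is excluded by
-- Pre_ and filled with a dummy ("","") to keep the port total.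
def kvcLoop (dkc dvc : List (String × String)) (numKeys : Int) :
    List (Int × String) → List (String × String × String) → List (String × String × String) →
    (List (String × String × String)) × (List (String × String × String))
  | [], accK, accV => (accK, accV)
  | (i, d) :: rest, accK, accV =>
    if i < numKeys then
      let cv := (PySem.List.pyGet? dkc i).getD ("", "")
      kvcLoop dkc dvc numKeys rest (accK ++ [(cv.1, cv.2, d)]) accV
    else
      let cv := (PySem.List.pyGet? dvc (i - numKeys)).getD ("", "")
      kvcLoop dkc dvc numKeys rest accK (accV ++ [(cv.1, cv.2, d)])

def key_value_copy (source_data : List String) (dest_key_cv : List (String × String)) (dest_value_cv : List (String × String)) : (List (String × String × String)) × (List (String × String × String)) :=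
  kvcLoop dest_key_cv dest_value_cv (dest_key_cv.length : Int)
    (PySem.List.enumerate source_data) [] []

-- ===== PORT B =====
-- Source B: structural recursion consuming source_data with dest_key_cv, then dest_value_cv.
-- 'dest_value_cv[0]' when dest_key_cv is empty is pyGet? at 0 (none = IndexError, excluded
-- by Pre_, filled with a dummy ("","")); 'dest_value_cv[1:]' is the slice from 1.
def key_value_copy_alt (source_data : List String) (dest_key_cv : List (String × String)) (dest_value_cv : List (String × String)) : (List (String × String × String)) × (List (String × String × String)) :=
  match source_data, dest_key_cv with
  | [], _ => ([], [])
  | d :: rest, cv :: dkt =>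
    let p := key_value_copy_alt rest dkt dest_value_cv
    ((cv.1, cv.2, d) :: p.1, p.2)
  | d :: rest, [] =>
    let cv := (PySem.List.pyGet? dest_value_cv 0).getD ("", "")
    let p := key_value_copy_alt rest [] (PySem.List.slice dest_value_cv (some 1) none)
    (p.1, (cv.1, cv.2, d) :: p.2)

-- ===== PRECONDITION & SPEC =====
-- Pre_ excludes exactly the inputs on which Python A raises IndexError:
-- source_data longer than dest_key_cv + dest_value_cv (B raises there too).
def Pre_key_value_copy (source_data : List String) (dest_key_cv : List (String × String)) (dest_value_cv : List (String × String)) : Prop :=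
  source_data.length ≤ dest_key_cv.length + dest_value_cv.length
instance (source_data : List String) (dest_key_cv : List (String × String)) (dest_value_cv : List (String × String)) : Decidable (Pre_key_value_copy source_data dest_key_cv dest_value_cv) := by unfold Pre_key_value_copy; infer_instance
def pvWitness_key_value_copy : List String × (List (String × String)) × (List (String × String)) :=
  (["a", "b", "c"], [("id", "k")], [("x", "v"), ("y", "v")])

def Spec_key_value_copy (source_data : List String) (dest_key_cv : List (String × String)) (dest_value_cv : List (String × String)) (out : (List (String × String × String)) × (List (String × String × String))) : Prop := out = key_value_copy_alt source_data dest_key_cv dest_value_cv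
instance (source_data : List String) (dest_key_cv : List (String × String)) (dest_value_cv : List (String × String)) (out : (List (String × String × String)) × (List (String × String × String))) : Decidable (Spec_key_value_copy source_data dest_key_cv dest_value_cv out) := by unfold Spec_key_value_copy; infer_instance

-- ===== CLAIM (what is proved, stated in full; the proofs are below) =====
def Claim_equal_key_value_copy : Prop := ∀ (source_data : List String) (dest_key_cv : List (String × String)) (dest_value_cv : List (String × String)), Dom_key_value_copy source_data dest_key_cv dest_value_cv → Pre_key_value_copy source_data dest_key_cv dest_value_cv → Spec_key_value_copy source_data dest_key_cv dest_value_cv (key_value_copy source_data dest_key_cv dest_value_cv)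

-- ===== LEMMAS AND PROOFS =====

-- splitting the loop over an appended enumeration
theorem kvcLoop_append (dkc dvc : List (String × String)) (K : Int)
    (l1 l2 : List (Int × String)) (aK aV : List (String × String × String)) :
    kvcLoop dkc dvc K (l1 ++ l2) aK aV =
      kvcLoop dkc dvc K l2 (kvcLoop dkc dvc K l1 aK aV).1 (kvcLoop dkc dvc K l1 aK aV).2 := by
  induction l1 generalizing aK aV with
  | nil => simp [kvcLoop]
  | cons h t ih =>
    obtain ⟨i, d⟩ := h
    by_cases hi : i < K <;> simp [kvcLoop, hi, ih]

-- key phase: all indices below K, so only the key accumulator grows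
theorem kvcLoop_keys (dkc dvc : List (String × String)) (K : Int)
    (xs : List String) (s : Int) (hs : 0 ≤ s) (hK : s + xs.length ≤ K)
    (aK aV : List (String × String × String)) :
    kvcLoop dkc dvc K (PySem.List.enumerate xs s) aK aV =
      (aK ++ (PySem.List.enumerate xs s).map
        (fun p => (((PySem.List.pyGet? dkc p.1).getD ("", "")).1,
                   ((PySem.List.pyGet? dkc p.1).getD ("", "")).2, p.2)), aV) := by
  induction xs generalizing s aK with
  | nil => simp [PySem.List.enumerate_nil, kvcLoop]
  | cons x t ih =>
    have hi : s < K := by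
      have := hK; simp [List.length_cons] at this; omega
    rw [PySem.List.enumerate_cons]
    simp only [kvcLoop, hi, if_pos]
    rw [ih (s + 1) (by omega) (by simp at hK ⊢; omega)]
    simp

-- value phase: all indices at least K, so only the value accumulator grows,
-- and each index K + t reads dvc at offset t
theorem kvcLoop_vals (dkc dvc : List (String × String)) (K : Int)
    (xs : List String) (t : Int) (ht : 0 ≤ t)
    (aK aV : List (String × String × String)) :
    kvcLoop dkc dvc K (PySem.List.enumerate xs (K + t)) aK aV =
      (aK, aV ++ (PySem.List.enumerate xs t).map
        (fun p => (((PySem.List.pyGet? dvc p.1).getD ("", "")).1,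
                   ((PySem.List.pyGet? dvc p.1).getD ("", "")).2, p.2))) := by
  induction xs generalizing t aV with
  | nil => simp [PySem.List.enumerate_nil, kvcLoop]
  | cons x tl ih =>
    have hi : ¬ (K + t < K) := by omega
    rw [PySem.List.enumerate_cons, PySem.List.enumerate_cons]
    simp only [kvcLoop, hi, if_neg, not_false_iff]
    have harg : K + t + 1 = K + (t + 1) := by ring
    have hidx : K + t - K = t := by ring
    rw [hidx, harg, ih (t + 1) (by omega)]
    simp

-- the enumerate-map over a data list no longer than cvs is the zip-map
theorem enum_map_eq_zip (cvs : List (String × String)) (data : List String)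
    (h : data.length ≤ cvs.length) :
    (PySem.List.enumerate data 0).map
      (fun p => (((PySem.List.pyGet? cvs p.1).getD ("", "")).1,
                 ((PySem.List.pyGet? cvs p.1).getD ("", "")).2, p.2)) =
    (cvs.zip data).map (fun p => (p.1.1, p.1.2, p.2)) := by
  apply List.ext_getElem
  · simp [PySem.List.length_enumerate]; omega
  · intro j h1 h2
    simp only [List.getElem_map, PySem.List.getElem_enumerate, List.getElem_zip]
    have hj : j < cvs.length := by
      simp [PySem.List.length_enumerate] at h1; omega
    have : PySem.List.pyGet? cvs ((0 : Int) + (j : Nat)) = some cvs[j] := by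
      simp [PySem.List.pyGet?_natCast, List.getElem?_eq_getElem hj]
    rw [this]
    simp

-- zip truncates, so taking the left list's length on the right changes nothing
theorem zip_take_self (cvs : List (String × String)) (sd : List String) :
    cvs.zip (sd.take cvs.length) = cvs.zip sd := by
  induction cvs generalizing sd with
  | nil => simp
  | cons c ct ih =>
    cases sd with
    | nil => simp
    | cons x xs => simp [List.zip_cons_cons, ih]

-- A's value is the canonical pair of zip-maps
theorem key_value_copy_canon (sd : List String) (dkc dvc : List (String × String))
    (h : sd.length ≤ dkc.length + dvc.length) :
    key_value_copy sd dkc dvc =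
      ((dkc.zip sd).map (fun p => (p.1.1, p.1.2, p.2)),
       (dvc.zip (sd.drop dkc.length)).map (fun p => (p.1.1, p.1.2, p.2))) := by
  simp only [key_value_copy]
  have hsplit : sd = sd.take dkc.length ++ sd.drop dkc.length := (List.take_append_drop _ _).symm
  conv_lhs => rw [hsplit]
  rw [PySem.List.enumerate_append, kvcLoop_append]
  rw [kvcLoop_keys dkc dvc _ _ 0 (by omega)
    (by push_cast [List.length_take]; omega)]
  by_cases hle : dkc.length ≤ sd.length
  · have hlen : (sd.take dkc.length).length = dkc.length := by
      simp [List.length_take]; omega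
    have hstart : (0 : Int) + ((sd.take dkc.length).length : Int)
        = (dkc.length : Int) + 0 := by rw [hlen]; ring
    rw [hstart, kvcLoop_vals dkc dvc _ _ 0 (by omega)]
    have hk : (sd.take dkc.length).length ≤ dkc.length := by
      simp [List.length_take]
    have hv : (sd.drop dkc.length).length ≤ dvc.length := by
      simp [List.length_drop]; omega
    rw [enum_map_eq_zip dkc _ hk, enum_map_eq_zip dvc _ hv, zip_take_self]
    simp
  · have hdrop : sd.drop dkc.length = [] := by
      rw [List.drop_eq_nil_iff]; omega
    rw [hdrop]
    have htake : sd.take dkc.length = sd := by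
      apply List.take_of_length_le; omega
    rw [htake, enum_map_eq_zip dkc sd (by omega)]
    simp [PySem.List.enumerate_nil, kvcLoop]

-- B's value is the same canonical pair
theorem key_value_copy_alt_canon (sd : List String) (dkc dvc : List (String × String))
    (h : sd.length ≤ dkc.length + dvc.length) :
    key_value_copy_alt sd dkc dvc =
      ((dkc.zip sd).map (fun p => (p.1.1, p.1.2, p.2)),
       (dvc.zip (sd.drop dkc.length)).map (fun p => (p.1.1, p.1.2, p.2))) := by
  induction sd generalizing dkc dvc with
  | nil => cases dkc <;> simp [key_value_copy_alt]
  | cons d rest ih =>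
    cases dkc with
    | cons cv dkt =>
      simp only [key_value_copy_alt]
      rw [ih dkt dvc (by simp at h; omega)]
      simp
    | nil =>
      cases dvc with
      | nil => simp at h
      | cons w dvt =>
        simp only [key_value_copy_alt, PySem.List.slice_from_one, List.tail_cons]
        rw [ih [] dvt (by simp at h ⊢; omega)]
        simp [PySem.List.pyGet?, PySem.List.pyIdx?]

-- ===== VERDICT (by name: the statement is the Claim_ definition above) =====
theorem key_value_copy_spec : Claim_equal_key_value_copy := by
  intro sd dkc dvc _ hpre
  unfold Spec_key_value_copy
  rw [key_value_copy_canon sd dkc dvc hpre, key_value_copy_alt_canon sd dkc dvc hpre]
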